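-- pv_equiv track=rewrite | github.com/QI1002/exampool | Leetcode/255.py | validPreorder
-- ===== SOURCE A (Python) =====
-- def validPreorder(data):
--     if (len(data) == 0): return True
--
--     r = data[0]
--     i = 1
--     while(i < len(data) and data[i] < r):
--         i+=1
--
--     j = i
--     while(j < len(data)):
--         if (data[j] < r): return False
--         j += 1
--
--     if (validPreorder(data[1:i]) == False): return False
--     if (validPreorder(data[i:]) == False): return False
--     return True
-- ===== SOURCE B (Python) =====
-- def validPreorder(data):
--     # Single left-to-right pass with explicit bounds: consume each element under the
--     # current (lo, hi) window (None = unbounded); entering a node narrows hi to it and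
--     # pushes the old window's resume point; when the window fails, pop: the finished
--     # node becomes the new lower bound and the saved hi is restored.
--     lo = None
--     hi = None
--     stack = []
--     i = 0
--     while True:
--         if i < len(data) and (lo is None or data[i] >= lo) and (hi is None or data[i] < hi):
--             stack.append((data[i], hi))
--             hi = data[i]
--             i += 1
--         elif stack:
--             lo, hi = stack.pop()
--         else:
--             break
--     return i == len(data)
-- ===== Notes on version B (the rewrite author's own statement) =====
-- stated objective: faster
-- what changed: Replaced A's divide-and-conquer (rescan to find the split point, rescan to check the right part, recurse on list slices) by a single iterative left-to-right pass that keeps a running (lo, hi) bounds window and an explicit stack of pending windows, touching each element O(1) amortised times with no slicing or recursion.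
import Mathlib
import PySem

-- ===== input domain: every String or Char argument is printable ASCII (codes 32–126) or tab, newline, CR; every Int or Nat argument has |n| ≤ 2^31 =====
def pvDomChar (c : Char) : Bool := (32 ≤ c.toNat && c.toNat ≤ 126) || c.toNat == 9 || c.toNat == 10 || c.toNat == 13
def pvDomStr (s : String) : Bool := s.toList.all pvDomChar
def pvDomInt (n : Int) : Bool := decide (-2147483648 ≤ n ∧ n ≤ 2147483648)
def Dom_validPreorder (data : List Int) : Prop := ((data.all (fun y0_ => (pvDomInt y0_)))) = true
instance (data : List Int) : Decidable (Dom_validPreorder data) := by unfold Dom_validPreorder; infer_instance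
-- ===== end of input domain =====

-- B replaces A's divide-and-conquer (rescans and slices) by one iterative left-to-right
-- pass carrying a (lo, hi) bounds window and a stack of pending windows; objective: faster
-- (measured faster in a timing run).

-- ===== PORT A =====
-- first while loop: 'i = 1; while i < len(data) and data[i] < r: i += 1', scanning rest = data[1:];
-- returns i - 1 = number of leading elements of rest that are < r (exact: the loop stops at the
-- first index with data[i] >= r or at the end)
def aFindSplit (r : Int) : List Int → Nat
  | [] => 0
  | x :: xs => if x < r then aFindSplit r xs + 1 else 0

-- second while loop: 'while j < len(data): if data[j] < r: return False', run on data[i:]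
def aCheckRest (r : Int) : List Int → Bool
  | [] => true
  | x :: xs => if x < r then false else aCheckRest r xs

-- data[1:i] = rest.take (aFindSplit r rest) and data[i:] = rest.drop (aFindSplit r rest),
-- exact since 1 ≤ i ≤ len(data)
def validPreorder (data : List Int) : Bool :=
  match data with
  | [] => true
  | r :: rest =>
    let i := aFindSplit r rest
    if aCheckRest r (List.drop i rest) = false then false
    else if validPreorder (List.take i rest) = false then false
    else if validPreorder (List.drop i rest) = false then false
    else true
termination_by data.length
decreasing_by
  · simp [List.length_take]
  · simp [List.length_drop]

-- ===== PORT B =====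
-- 'lo is None or x >= lo'
def bLowOk (lo : Option Int) (x : Int) : Bool :=
  match lo with
  | none => true
  | some a => a ≤ x

-- 'hi is None or x < hi'
def bHighOk (hi : Option Int) (x : Int) : Bool :=
  match hi with
  | none => true
  | some b => x < b

-- Source B's while loop, with the suffix data[i:] standing for the index i (the final
-- 'i == len(data)' test becomes an emptiness test on the remaining suffix)
def bLoop : List Int → Option Int → Option Int → List (Int × Option Int) → List Int
  | x :: rest, lo, hi, stack =>
    if bLowOk lo x && bHighOk hi x then
      bLoop rest lo (some x) ((x, hi) :: stack)
    else
      match stack with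
      | (r, h) :: st => bLoop (x :: rest) (some r) h st
      | [] => x :: rest
  | [], _, _, stack =>
    match stack with
    | (r, h) :: st => bLoop ([] : List Int) (some r) h st
    | [] => []
termination_by xs _ _ stack => (xs.length, stack.length)

-- 'return i == len(data)'
def validPreorder_alt (data : List Int) : Bool :=
  (bLoop data none none []).isEmpty

-- ===== PRECONDITION & SPEC =====
def Spec_validPreorder (data : List Int) (out : Bool) : Prop := out = validPreorder_alt data
instance (data : List Int) (out : Bool) : Decidable (Spec_validPreorder data out) := by unfold Spec_validPreorder; infer_instance

-- ===== CLAIM (what is proved, stated in full; the proofs are below) =====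
def Claim_equal_validPreorder : Prop := ∀ (data : List Int), Dom_validPreorder data → Spec_validPreorder data (validPreorder data)

-- ===== LEMMAS AND PROOFS =====

-- proof-side recursive form of Source B's loop: skip xs lo hi consumes the longest prefix of
-- xs that is a valid preorder list with values in [lo, hi); the subtype part carries the
-- length bound needed for termination
def bSkip (xs : List Int) (lo hi : Option Int) : { s : List Int // s.length ≤ xs.length } :=
  match xs with
  | [] => ⟨[], Nat.le_refl _⟩
  | x :: rest =>
    if bLowOk lo x && bHighOk hi x then
      let r1 := bSkip rest lo (some x)
      let r2 := bSkip r1.1 (some x) hi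
      ⟨r2.1, Nat.le_trans r2.2 (Nat.le_trans r1.2 (Nat.le_succ _))⟩
    else ⟨x :: rest, Nat.le_refl _⟩
termination_by xs.length
decreasing_by
  · simp
  · exact Nat.lt_succ_of_le r1.2

-- the pending pops of bLoop's stack, as iterated bSkip calls
def bSkipAll : List (Int × Option Int) → List Int → List Int
  | [], xs => xs
  | (r, h) :: st, xs => bSkipAll st (bSkip xs (some r) h).1

lemma take_aFindSplit_lt (r : Int) (xs : List Int) :
    ∀ x ∈ xs.take (aFindSplit r xs), x < r := by
  induction xs with
  | nil => simp
  | cons x xs ih =>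
    simp only [aFindSplit]
    split
    · rename_i h
      intro y hy
      simp only [List.take_succ_cons, List.mem_cons] at hy
      rcases hy with rfl | hy
      · exact h
      · exact ih y hy
    · simp

lemma drop_aFindSplit_head (r : Int) (xs : List Int) :
    ∀ z zs, xs.drop (aFindSplit r xs) = z :: zs → r ≤ z := by
  induction xs with
  | nil => simp
  | cons x xs ih =>
    simp only [aFindSplit]
    split
    · intro z zs h
      exact ih z zs (by simpa using h)
    · rename_i h
      intro z zs hz
      simp only [List.drop_zero] at hz
      cases hz
      omega

lemma aFindSplit_append (r : Int) (as bs : List Int)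
    (ha : ∀ a ∈ as, a < r) (hb : ∀ z zs, bs = z :: zs → r ≤ z) :
    aFindSplit r (as ++ bs) = as.length := by
  induction as with
  | nil =>
    cases bs with
    | nil => simp [aFindSplit]
    | cons z zs =>
      have := hb z zs rfl
      simp [aFindSplit]; omega
  | cons a as ih =>
    have h1 : a < r := ha a (by simp)
    simp only [List.cons_append, aFindSplit, if_pos h1, List.length_cons]
    rw [ih (fun x hx => ha x (by simp [hx]))]

lemma aCheckRest_iff (r : Int) (xs : List Int) :
    aCheckRest r xs = true ↔ ∀ x ∈ xs, r ≤ x := by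
  induction xs with
  | nil => simp [aCheckRest]
  | cons x xs ih =>
    simp only [aCheckRest]
    split
    · rename_i h
      constructor
      · intro hfalse; cases hfalse
      · intro hall; exact absurd (hall x (by simp)) (by omega)
    · rename_i h
      rw [ih]
      constructor
      · intro hall y hy
        rcases List.mem_cons.mp hy with rfl | hy
        · omega
        · exact hall y hy
      · intro hall y hy
        exact hall y (by simp [hy])

-- unfolding lemma for the port of A, in && form
lemma validPreorder_cons (r : Int) (rest : List Int) :
    validPreorder (r :: rest) =
      (aCheckRest r (List.drop (aFindSplit r rest) rest) &&
       validPreorder (List.take (aFindSplit r rest) rest) &&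
       validPreorder (List.drop (aFindSplit r rest) rest)) := by
  rw [validPreorder]
  cases h1 : aCheckRest r (List.drop (aFindSplit r rest) rest) <;>
    cases h2 : validPreorder (List.take (aFindSplit r rest) rest) <;>
      cases h3 : validPreorder (List.drop (aFindSplit r rest) rest) <;>
        simp

-- unfolding lemmas for the port of B
lemma bSkip_nil (lo hi : Option Int) : (bSkip [] lo hi).1 = [] := by
  rw [bSkip]

lemma bSkip_cons_true (x : Int) (rest : List Int) (lo hi : Option Int)
    (h : (bLowOk lo x && bHighOk hi x) = true) :
    (bSkip (x :: rest) lo hi).1 = (bSkip (bSkip rest lo (some x)).1 (some x) hi).1 := by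
  rw [bSkip]; simp [h]

lemma bSkip_cons_false (x : Int) (rest : List Int) (lo hi : Option Int)
    (h : (bLowOk lo x && bHighOk hi x) = false) :
    (bSkip (x :: rest) lo hi).1 = x :: rest := by
  rw [bSkip]; simp [h]

-- the iterative loop of the port of B computes the iterated-skip normal form
lemma bLoop_eq_bSkipAll (n : Nat) : ∀ (xs : List Int) (lo hi : Option Int)
    (stack : List (Int × Option Int)),
    2 * xs.length + stack.length ≤ n →
    bLoop xs lo hi stack = bSkipAll stack (bSkip xs lo hi).1 := by
  induction n with
  | zero =>
    intro xs lo hi stack hlen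
    have h0 : xs.length = 0 ∧ stack.length = 0 := by omega
    have hx := List.length_eq_zero_iff.mp h0.1
    have hs := List.length_eq_zero_iff.mp h0.2
    subst hx; subst hs
    rw [bLoop]
    simp [bSkipAll, bSkip_nil]
  | succ n ih =>
    intro xs lo hi stack hlen
    cases xs with
    | nil =>
      cases stack with
      | nil => rw [bLoop]; simp [bSkipAll, bSkip_nil]
      | cons p st =>
        obtain ⟨r, h⟩ := p
        rw [bLoop]
        rw [ih [] (some r) h st (by simp at hlen ⊢; omega)]
        simp only [bSkipAll]
        rw [bSkip_nil lo hi, bSkip_nil (some r) h]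
    | cons x rest =>
      cases hcond : (bLowOk lo x && bHighOk hi x) with
      | true =>
        rw [bLoop.eq_def]
        simp only [hcond, if_true]
        rw [ih rest lo (some x) ((x, hi) :: stack) (by simp at hlen ⊢; omega)]
        rw [bSkip_cons_true x rest lo hi hcond]
        rfl
      | false =>
        rw [bLoop.eq_def]
        simp only [hcond, Bool.false_eq_true, if_false]
        cases stack with
        | nil =>
          rw [bSkip_cons_false x rest lo hi hcond]
          simp [bSkipAll]
        | cons p st =>
          obtain ⟨r, h⟩ := p
          dsimp only
          rw [ih (x :: rest) (some r) h st (by simp at hlen ⊢; omega)]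
          rw [bSkip_cons_false x rest lo hi hcond]
          simp [bSkipAll]

lemma validPreorder_alt_eq_bSkip (data : List Int) :
    validPreorder_alt data = (bSkip data none none).1.isEmpty := by
  unfold validPreorder_alt
  rw [bLoop_eq_bSkipAll (2 * data.length) data none none [] (by simp)]
  rfl

-- L1: skip consumes exactly a valid, in-bounds tree list, stopping at an out-of-bounds head
lemma bSkip_consume (n : Nat) : ∀ (ys zs : List Int) (lo hi : Option Int),
    ys.length ≤ n →
    validPreorder ys = true →
    (∀ y ∈ ys, bLowOk lo y = true ∧ bHighOk hi y = true) →
    (∀ z zs', zs = z :: zs' → (bLowOk lo z && bHighOk hi z) = false) →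
    (bSkip (ys ++ zs) lo hi).1 = zs := by
  induction n with
  | zero =>
    intro ys zs lo hi hlen _ _ hstop
    have : ys = [] := List.length_eq_zero_iff.mp (Nat.le_zero.mp hlen)
    subst this
    simp only [List.nil_append]
    cases zs with
    | nil => exact bSkip_nil lo hi
    | cons z zs' => exact bSkip_cons_false z zs' lo hi (hstop z zs' rfl)
  | succ n ih =>
    intro ys zs lo hi hlen hvalid hbnd hstop
    cases ys with
    | nil =>
      simp only [List.nil_append]
      cases zs with
      | nil => exact bSkip_nil lo hi
      | cons z zs' => exact bSkip_cons_false z zs' lo hi (hstop z zs' rfl)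
    | cons r rest =>
      have hr := hbnd r (by simp)
      have hcond : (bLowOk lo r && bHighOk hi r) = true := by
        simp [hr.1, hr.2]
      set i := aFindSplit r rest with hi_def
      set L := rest.take i with hL
      set R := rest.drop i with hR
      have hsplit : rest = L ++ R := (List.take_append_drop i rest).symm
      rw [validPreorder_cons] at hvalid
      simp only [Bool.and_eq_true] at hvalid
      obtain ⟨⟨hchk, hvL⟩, hvR⟩ := hvalid
      have hLlen : L.length ≤ rest.length := by simp [hL]
      have hRlen : R.length ≤ rest.length := by simp [hR]
      have hrestlen : rest.length ≤ n := by simpa using Nat.lt_succ_iff.mp (Nat.lt_of_lt_of_le (by simp) hlen)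
      -- first recursive call consumes L
      have step1 : (bSkip (rest ++ zs) lo (some r)).1 = R ++ zs := by
        have : rest ++ zs = L ++ (R ++ zs) := by rw [hsplit, List.append_assoc]
        rw [this]
        apply ih L (R ++ zs) lo (some r) (Nat.le_trans hLlen hrestlen) hvL
        · intro y hy
          refine ⟨(hbnd y (by simp [hsplit, hy])).1, ?_⟩
          simp only [bHighOk, decide_eq_true_eq]
          exact take_aFindSplit_lt r rest y hy
        · intro z zs' hz
          cases hRc : R with
          | cons w ws =>
            rw [hRc] at hz
            cases hz
            have : r ≤ z := drop_aFindSplit_head r rest z ws (by rw [← hR, hRc])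
            simp [bHighOk]; omega
          | nil =>
            rw [hRc, List.nil_append] at hz
            have hzstop := hstop z zs' hz
            rcases Bool.and_eq_false_iff.mp hzstop with hlo | hhi
            · simp [hlo]
            · cases hi with
              | none => exact absurd hhi (by simp [bHighOk])
              | some b =>
                simp only [bHighOk, decide_eq_false_iff_not, not_lt] at hhi
                have hrb : r < b := by simpa [bHighOk] using hr.2
                simp [bHighOk]; omega
      -- second recursive call consumes R
      have step2 : (bSkip (R ++ zs) (some r) hi).1 = zs := by
        apply ih R zs (some r) hi (Nat.le_trans hRlen hrestlen) hvR
        · intro y hy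
          refine ⟨?_, (hbnd y (by simp [hsplit, hy])).2⟩
          simp only [bLowOk, decide_eq_true_eq]
          exact (aCheckRest_iff r R).mp hchk y hy
        · intro z zs' hz
          have hzstop := hstop z zs' hz
          rcases Bool.and_eq_false_iff.mp hzstop with hlo | hhi
          · cases lo with
            | none => exact absurd hlo (by simp [bLowOk])
            | some a =>
              simp only [bLowOk, decide_eq_false_iff_not, not_le] at hlo
              have har : a ≤ r := by simpa [bLowOk] using hr.1
              simp [bLowOk]; omega
          · simp [hhi]
      calc (bSkip ((r :: rest) ++ zs) lo hi).1
          = (bSkip (bSkip (rest ++ zs) lo (some r)).1 (some r) hi).1 :=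
            bSkip_cons_true r (rest ++ zs) lo hi hcond
        _ = zs := by rw [step1]; exact step2

-- L2: whatever skip consumed is a valid, in-bounds tree list
lemma bSkip_decompose (n : Nat) : ∀ (xs : List Int) (lo hi : Option Int),
    xs.length ≤ n →
    ∃ ws, xs = ws ++ (bSkip xs lo hi).1 ∧ validPreorder ws = true ∧
      ∀ w ∈ ws, bLowOk lo w = true ∧ bHighOk hi w = true := by
  induction n with
  | zero =>
    intro xs lo hi hlen
    have : xs = [] := List.length_eq_zero_iff.mp (Nat.le_zero.mp hlen)
    subst this
    exact ⟨[], by simp [bSkip_nil], by rw [validPreorder], by simp⟩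
  | succ n ih =>
    intro xs lo hi hlen
    cases xs with
    | nil => exact ⟨[], by simp [bSkip_nil], by rw [validPreorder], by simp⟩
    | cons x rest =>
      cases hcond : (bLowOk lo x && bHighOk hi x) with
      | false =>
        exact ⟨[], by simp [bSkip_cons_false x rest lo hi hcond], by rw [validPreorder], by simp⟩
      | true =>
        have hrestlen : rest.length ≤ n := by simpa using Nat.lt_succ_iff.mp (Nat.lt_of_lt_of_le (by simp) hlen)
        obtain ⟨ws1, hsp1, hv1, hb1⟩ := ih rest lo (some x) hrestlen
        obtain ⟨ws2, hsp2, hv2, hb2⟩ :=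
          ih (bSkip rest lo (some x)).1 (some x) hi
            (Nat.le_trans (bSkip rest lo (some x)).2 hrestlen)
        have hcond2 := hcond
        simp only [Bool.and_eq_true] at hcond2
        obtain ⟨hxlo, hxhi⟩ := hcond2
        refine ⟨x :: (ws1 ++ ws2), ?_, ?_, ?_⟩
        · rw [bSkip_cons_true x rest lo hi hcond]
          simp only [List.cons_append, List.append_assoc]
          rw [← hsp2, ← hsp1]
        · -- the consumed prefix is a valid preorder list
          have hws1lt : ∀ w ∈ ws1, w < x := by
            intro w hw
            simpa [bHighOk] using (hb1 w hw).2
          have hws2ge : ∀ w ∈ ws2, x ≤ w := by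
            intro w hw
            simpa [bLowOk] using (hb2 w hw).1
          have hfs : aFindSplit x (ws1 ++ ws2) = ws1.length := by
            apply aFindSplit_append x ws1 ws2 hws1lt
            intro z zs hz
            exact hws2ge z (by simp [hz])
          rw [validPreorder_cons, hfs]
          rw [List.take_left, List.drop_left]
          rw [hv1, hv2, (aCheckRest_iff x ws2).mpr hws2ge]
          rfl
        · intro w hw
          simp only [List.mem_cons, List.mem_append] at hw
          rcases hw with rfl | hw | hw
          · exact ⟨hxlo, hxhi⟩
          · refine ⟨(hb1 w hw).1, ?_⟩
            have hwx : w < x := by simpa [bHighOk] using (hb1 w hw).2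
            cases hi with
            | none => rfl
            | some b =>
              have : x < b := by simpa [bHighOk] using hxhi
              simp [bHighOk]; omega
          · refine ⟨?_, (hb2 w hw).2⟩
            have hxw : x ≤ w := by simpa [bLowOk] using (hb2 w hw).1
            cases lo with
            | none => rfl
            | some a =>
              have : a ≤ x := by simpa [bLowOk] using hxlo
              simp [bLowOk]; omega

lemma validPreorder_eq_alt (data : List Int) : validPreorder data = validPreorder_alt data := by
  cases hA : validPreorder data with
  | true =>
    have h0 : (bSkip (data ++ []) none none).1 = [] := by
      apply bSkip_consume data.length data [] none none (Nat.le_refl _) hA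
      · intro y _; exact ⟨rfl, rfl⟩
      · intro z zs' h; cases h
    rw [List.append_nil] at h0
    rw [validPreorder_alt_eq_bSkip]
    simp [h0]
  | false =>
    obtain ⟨ws, hsp, hv, _⟩ := bSkip_decompose data.length data none none (Nat.le_refl _)
    cases hres : (bSkip data none none).1 with
    | nil =>
      rw [hres, List.append_nil] at hsp
      rw [hsp, hv] at hA
      cases hA
    | cons z zs =>
      rw [validPreorder_alt_eq_bSkip]
      simp [hres]

-- ===== VERDICT (by name: the statement is the Claim_ definition above) =====
theorem validPreorder_spec : Claim_equal_validPreorder := by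
  intro data _
  unfold Spec_validPreorder
  exact validPreorder_eq_alt data
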